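-- pv_equiv track=rewrite | github.com/daveisagit/advent-of-code | src/common/grid_2d.py | set_dihedral_arrangements
-- ===== SOURCE A (Python) =====
-- from operator import add, sub
--
-- def rotate90(v, about=(0, 0)):
--     """Rotate anticlockwise 90"""
--     return (-v[1], v[0])
--
-- def set_translate(g, v):
--     ng = set()
--     for p in g:
--         q = tuple(map(add, p, v))
--         ng.add(q)
--     return ng
--
-- def set_reflect_y(g):
--     ng = set()
--     for r, c in g:
--         r = -r
--         q = (r, c)
--         ng.add(q)
--     return ng
--
-- def set_rotate_90(g):
--     ng = set()
--     for p in g: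
--         q = rotate90(p)
--         ng.add(q)
--     return ng
--
-- def set_dihedral_arrangements(g, sz):
--     """Generator for the 8 arrangements of a square grid
--     returns a triple a,b,grid where a is the number of rotations and b reflections"""
--     # Rotate 4 times
--     # Reflect and rotate 4 times again
--     sg = g
--     sz -= 1
--     for a in range(4):
--         yield a, 0, sg
--         sg = set_rotate_90(sg)
--         sg = set_translate(sg, (sz, 0))
--
--     sg = set_reflect_y(sg)
--     sg = set_translate(sg, (sz, 0))
--     for a in range(4):
--         yield a, 1, sg
--         sg = set_rotate_90(sg)
--         sg = set_translate(sg, (sz, 0))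
-- ===== SOURCE B (Python) =====
-- def set_dihedral_arrangements(g, sz):
--     """Generator for the 8 arrangements of a square grid
--     returns a triple a,b,grid where a is the number of rotations and b reflections"""
--     m = sz - 1
--     maps = [
--         (0, 0, lambda r, c: (r, c)),
--         (1, 0, lambda r, c: (m - c, r)),
--         (2, 0, lambda r, c: (m - r, m - c)),
--         (3, 0, lambda r, c: (c, m - r)),
--         (0, 1, lambda r, c: (m - r, c)),
--         (1, 1, lambda r, c: (m - c, m - r)),
--         (2, 1, lambda r, c: (r, m - c)),
--         (3, 1, lambda r, c: (c, r)),
--     ]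
--     for a, b, f in maps:
--         yield a, b, {f(r, c) for r, c in g}
-- ===== Notes on version B (the rewrite author's own statement) =====
-- stated objective: simpler
-- what changed: Instead of iteratively rotating/translating the running set 8 times (each arrangement built from the previous one through three chained set-building passes), B precomputes m = sz-1 and applies each of the 8 closed-form dihedral coordinate maps directly to the original grid in one pass each.
import Mathlib
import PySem

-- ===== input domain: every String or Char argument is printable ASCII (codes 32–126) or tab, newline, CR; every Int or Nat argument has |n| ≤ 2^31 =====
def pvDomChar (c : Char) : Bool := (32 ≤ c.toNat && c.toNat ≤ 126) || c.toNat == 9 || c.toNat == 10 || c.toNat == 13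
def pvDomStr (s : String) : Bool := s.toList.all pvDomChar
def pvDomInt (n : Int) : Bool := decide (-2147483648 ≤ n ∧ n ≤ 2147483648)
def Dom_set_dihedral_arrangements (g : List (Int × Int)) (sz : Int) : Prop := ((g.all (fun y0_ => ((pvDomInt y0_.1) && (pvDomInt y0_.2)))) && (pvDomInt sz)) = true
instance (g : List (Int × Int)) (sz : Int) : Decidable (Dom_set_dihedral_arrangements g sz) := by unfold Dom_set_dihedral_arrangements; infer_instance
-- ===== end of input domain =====

-- B replaces A's chain of incremental rotate/translate set passes by the 8 closed-form
-- dihedral coordinate maps applied directly to the original grid (objective: simpler).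

-- ===== PORT A =====
def pvRotate90 (v : Int × Int) : Int × Int := (-v.2, v.1)

def pvSetTranslate (g : List (Int × Int)) (v : Int × Int) : List (Int × Int) :=
  g.foldl (fun ng p => PySem.Set.add ng (p.1 + v.1, p.2 + v.2)) PySem.Set.empty

def pvSetReflectY (g : List (Int × Int)) : List (Int × Int) :=
  g.foldl (fun ng p => PySem.Set.add ng (-p.1, p.2)) PySem.Set.empty

def pvSetRotate90 (g : List (Int × Int)) : List (Int × Int) :=
  g.foldl (fun ng p => PySem.Set.add ng (pvRotate90 p)) PySem.Set.empty

def set_dihedral_arrangements (g : List (Int × Int)) (sz : Int) : List (Int × Int × (List (Int × Int))) :=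
  let sz := sz - 1
  let st1 := (PySem.List.pyRange 0 4 1).foldl
    (fun st a => (st.1 ++ [(a, (0 : Int), st.2)], pvSetTranslate (pvSetRotate90 st.2) (sz, 0)))
    (([] : List (Int × Int × (List (Int × Int)))), g)
  let sg := pvSetTranslate (pvSetReflectY st1.2) (sz, 0)
  ((PySem.List.pyRange 0 4 1).foldl
    (fun st a => (st.1 ++ [(a, (1 : Int), st.2)], pvSetTranslate (pvSetRotate90 st.2) (sz, 0)))
    (st1.1, sg)).1

-- ===== PORT B =====
def pvMaps (m : Int) : List (Int × Int × ((Int × Int) → (Int × Int))) :=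
  [ (0, 0, fun p => (p.1, p.2)),
    (1, 0, fun p => (m - p.2, p.1)),
    (2, 0, fun p => (m - p.1, m - p.2)),
    (3, 0, fun p => (p.2, m - p.1)),
    (0, 1, fun p => (m - p.1, p.2)),
    (1, 1, fun p => (m - p.2, m - p.1)),
    (2, 1, fun p => (p.1, m - p.2)),
    (3, 1, fun p => (p.2, p.1)) ]

def set_dihedral_arrangements_alt (g : List (Int × Int)) (sz : Int) : List (Int × Int × (List (Int × Int))) :=
  let m := sz - 1
  (pvMaps m).map (fun t => (t.1, t.2.1, PySem.Set.ofList (g.map t.2.2)))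

-- ===== PRECONDITION & SPEC =====
-- Pre_ excludes lists with duplicate points: g is a Python set, and on a duplicate-carrying
-- list A's first yielded grid is the raw input verbatim while all other grids (and B's) are
-- deduplicated sets — an artefact of when A converts to a set.
def Pre_set_dihedral_arrangements (g : List (Int × Int)) (sz : Int) : Prop := g.Nodup
instance (g : List (Int × Int)) (sz : Int) : Decidable (Pre_set_dihedral_arrangements g sz) := by unfold Pre_set_dihedral_arrangements; infer_instance

def pvWitness_set_dihedral_arrangements : (List (Int × Int)) × Int := ([(0, 0), (0, 1), (1, 1)], 3)

def Spec_set_dihedral_arrangements (g : List (Int × Int)) (sz : Int) (out : List (Int × Int × (List (Int × Int)))) : Prop := out = set_dihedral_arrangements_alt g sz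
instance (g : List (Int × Int)) (sz : Int) (out : List (Int × Int × (List (Int × Int)))) : Decidable (Spec_set_dihedral_arrangements g sz out) := by unfold Spec_set_dihedral_arrangements; infer_instance

-- ===== CLAIM (what is proved, stated in full; the proofs are below) =====
def Claim_equal_set_dihedral_arrangements : Prop := ∀ (g : List (Int × Int)) (sz : Int), Dom_set_dihedral_arrangements g sz → Pre_set_dihedral_arrangements g sz → Spec_set_dihedral_arrangements g sz (set_dihedral_arrangements g sz)

-- ===== LEMMAS AND PROOFS =====

-- building a set by adding f p for each p of a duplicate-free list, f injective, is just List.map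
theorem pv_setmap {f : (Int × Int) → (Int × Int)} (hf : Function.Injective f)
    (l : List (Int × Int)) (hl : l.Nodup) :
    l.foldl (fun s p => PySem.Set.add s (f p)) PySem.Set.empty = l.map f := by
  rw [← PySem.Set.update_map_eq_foldl_add]
  show PySem.Set.update [] (l.map f) = _
  rw [PySem.Set.update_nil_left, PySem.Set.ofList_eq_self_of_nodup _ (hl.map hf)]

theorem pv_ofmap {f : (Int × Int) → (Int × Int)} (hf : Function.Injective f)
    (l : List (Int × Int)) (hl : l.Nodup) :
    PySem.Set.ofList (l.map f) = l.map f :=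
  PySem.Set.ofList_eq_self_of_nodup _ (hl.map hf)

theorem pv_inj_rot : Function.Injective pvRotate90 := by
  intro p q h; simp [pvRotate90, Prod.ext_iff] at h ⊢; omega

theorem pv_inj_tr (v : Int × Int) :
    Function.Injective (fun p : Int × Int => (p.1 + v.1, p.2 + v.2)) := by
  intro p q h; simp [Prod.ext_iff] at h ⊢; omega

theorem pv_inj_refl : Function.Injective (fun p : Int × Int => ((-p.1 : Int), p.2)) := by
  intro p q h; simp [Prod.ext_iff] at h ⊢; omega

-- one rotate-then-translate step of A, as a map over a duplicate-free list
theorem pv_step (m : Int) (l : List (Int × Int)) (hl : l.Nodup) :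
    pvSetTranslate (pvSetRotate90 l) (m, 0) = l.map (fun p => (m - p.2, p.1)) := by
  unfold pvSetTranslate pvSetRotate90
  rw [pv_setmap pv_inj_rot l hl, pv_setmap (pv_inj_tr (m, 0)) _ (hl.map pv_inj_rot),
    List.map_map]
  refine List.map_congr_left ?_
  intro p _; simp [pvRotate90, Prod.ext_iff]; omega

theorem pv_step_nodup (m : Int) (l : List (Int × Int)) (hl : l.Nodup) :
    (l.map (fun p : Int × Int => (m - p.2, p.1))).Nodup :=
  hl.map (by intro p q h; simp [Prod.ext_iff] at h ⊢; omega)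

-- the reflect-then-translate step of A
theorem pv_refl_step (m : Int) (l : List (Int × Int)) (hl : l.Nodup) :
    pvSetTranslate (pvSetReflectY l) (m, 0) = l.map (fun p => (m - p.1, p.2)) := by
  unfold pvSetTranslate pvSetReflectY
  rw [pv_setmap pv_inj_refl l hl, pv_setmap (pv_inj_tr (m, 0)) _ (hl.map pv_inj_refl),
    List.map_map]
  refine List.map_congr_left ?_
  intro p _; simp [Prod.ext_iff]; omega

theorem pv_pyRange4 : PySem.List.pyRange 0 4 1 = [0, 1, 2, 3] := by decide

-- ===== VERDICT (by name: the statement is the Claim_ definition above) =====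
theorem set_dihedral_arrangements_spec : Claim_equal_set_dihedral_arrangements := by
  intro g sz _ hg
  unfold Spec_set_dihedral_arrangements set_dihedral_arrangements set_dihedral_arrangements_alt pvMaps
  rw [pv_pyRange4]
  set m := sz - 1 with hm
  simp only [List.foldl, List.map, List.nil_append, List.cons_append]
  have h1 := pv_step m g hg
  have n1 := pv_step_nodup m g hg
  have h2 := pv_step m _ n1
  have n2 := pv_step_nodup m _ n1
  have h3 := pv_step m _ n2
  have n3 := pv_step_nodup m _ n2
  have h4 := pv_step m _ n3
  have n4 := pv_step_nodup m _ n3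
  have hr := pv_refl_step m _ n4
  have nr : ((g.map (fun p : Int × Int => (m - p.2, p.1))).map (fun p : Int × Int => (m - p.2, p.1))
      |>.map (fun p : Int × Int => (m - p.2, p.1)) |>.map (fun p : Int × Int => (m - p.2, p.1))
      |>.map (fun p : Int × Int => (m - p.1, p.2))).Nodup :=
    (n4.map (by intro p q h; simp [Prod.ext_iff] at h ⊢; omega))
  have h5 := pv_step m _ nr
  have n5 := pv_step_nodup m _ nr
  have h6 := pv_step m _ n5
  have n6 := pv_step_nodup m _ n5
  have h7 := pv_step m _ n6
  simp only [h1, h2, h3, h4, hr, h5, h6, h7]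
  simp only [List.map_map]
  refine List.ext_getElem (by simp) ?_
  intro i hi hi'
  have hi8 : i < 8 := by simpa using hi
  interval_cases i <;>
    simp only [List.getElem_cons_zero, List.getElem_cons_succ] <;>
    refine Prod.ext rfl (Prod.ext rfl ?_) <;>
    rw [pv_ofmap (by intro p q h; simp [Prod.ext_iff] at h ⊢; omega) g hg] <;>
    refine List.ext_getElem (by simp) ?_ <;>
    (intro j hj hj'; simp [Function.comp]; try omega)
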